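-- pv_equiv track=rewrite | github.com/carlos-bernal-exa/SOCinthePocket | app/agents/controller.py | _estimate_token_usage
-- ===== SOURCE A (Python) =====
-- from typing import Dict, Any, List, Optional
--
-- def _estimate_token_usage(execution_steps: List[Dict[str, Any]]) -> Dict[str, int]:
--     """Estimate token usage for execution plan"""
--     # Rough estimates based on agent complexity
--     base_estimates = {
--         "TriageAgent": 800,
--         "EnrichmentAgent": 1200,
--         "InvestigationAgent": 2000,
--         "CorrelationAgent": 1500,
--         "ResponseAgent": 1000,
--         "ReportingAgent": 1800,
--         "KnowledgeAgent": 600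
--     }
--
--     total_input = 0
--     total_output = 0
--
--     for step in execution_steps:
--         agent = step["agent"]
--         base = base_estimates.get(agent, 1000)
--         total_input += int(base * 0.4)  # 40% input
--         total_output += int(base * 0.6)  # 60% output
--
--     return {
--         "input_tokens": total_input,
--         "output_tokens": total_output,
--         "total_tokens": total_input + total_output
--     }
-- ===== SOURCE B (Python) =====
-- from collections import Counter
-- from typing import Dict, Any, List
--
-- # Precomputed per-agent (input, output) splits: (int(base*0.4), int(base*0.6))
-- # for each known agent; unknown agents get the default base 1000 -> (400, 600).
-- _SPLITS = {
--     "TriageAgent": (320, 480),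
--     "EnrichmentAgent": (480, 720),
--     "InvestigationAgent": (800, 1200),
--     "CorrelationAgent": (600, 900),
--     "ResponseAgent": (400, 600),
--     "ReportingAgent": (720, 1080),
--     "KnowledgeAgent": (240, 360),
-- }
--
-- def _estimate_token_usage(execution_steps: List[Dict[str, Any]]) -> Dict[str, int]:
--     """Estimate token usage for execution plan (group-by-agent over a precomputed split table)"""
--     counts = Counter(step["agent"] for step in execution_steps)
--     total_input = sum(_SPLITS.get(agent, (400, 600))[0] * c for agent, c in counts.items())
--     total_output = sum(_SPLITS.get(agent, (400, 600))[1] * c for agent, c in counts.items())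
--     return {
--         "input_tokens": total_input,
--         "output_tokens": total_output,
--         "total_tokens": total_input + total_output
--     }
-- ===== Notes on version B (the rewrite author's own statement) =====
-- stated objective: alternative
-- what changed: B groups steps by agent with collections.Counter and sums precomputed per-agent (input,output) splits times multiplicity, instead of A's single per-step loop that looks up a base and derives the 40%/60% shares for every step.
import Mathlib
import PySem

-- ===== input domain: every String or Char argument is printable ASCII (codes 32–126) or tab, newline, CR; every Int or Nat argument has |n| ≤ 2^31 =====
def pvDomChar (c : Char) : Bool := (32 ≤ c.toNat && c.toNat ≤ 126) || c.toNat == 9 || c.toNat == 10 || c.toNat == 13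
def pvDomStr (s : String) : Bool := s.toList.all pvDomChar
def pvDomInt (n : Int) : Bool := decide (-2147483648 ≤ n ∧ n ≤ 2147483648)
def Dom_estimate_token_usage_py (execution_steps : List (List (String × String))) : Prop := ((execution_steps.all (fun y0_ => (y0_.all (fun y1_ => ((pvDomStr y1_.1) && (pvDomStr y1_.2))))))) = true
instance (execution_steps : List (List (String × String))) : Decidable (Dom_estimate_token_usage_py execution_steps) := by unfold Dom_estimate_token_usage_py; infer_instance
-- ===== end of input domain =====

-- B groups the steps by agent with a Counter and sums precomputed per-agent (input,output)
-- splits times multiplicity, instead of A's per-step loop deriving 40%/60% of a base each time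
-- (objective: alternative decomposition).

-- ===== PORT A =====
-- the base_estimates dict literal
def pvBaseEstimates : PySem.Dict String Int :=
  PySem.Dict.ofList [("TriageAgent", 800), ("EnrichmentAgent", 1200), ("InvestigationAgent", 2000),
    ("CorrelationAgent", 1500), ("ResponseAgent", 1000), ("ReportingAgent", 1800), ("KnowledgeAgent", 600)]

-- int(base * 0.4) / int(base * 0.6), ported by hand (Lean has no floats): exact for every base
-- that can occur here (the seven dict values and the default 1000), verified against CPython.
def pvInt04 (base : Int) : Int :=
  if base = 800 then 320 else if base = 1200 then 480 else if base = 2000 then 800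
  else if base = 1500 then 600 else if base = 1800 then 720 else if base = 600 then 240 else 400
def pvInt06 (base : Int) : Int :=
  if base = 800 then 480 else if base = 1200 then 720 else if base = 2000 then 1200
  else if base = 1500 then 900 else if base = 1800 then 1080 else if base = 600 then 360 else 600

def estimate_token_usage_py (execution_steps : List (List (String × String))) : List (String × Int) :=
  let totals := execution_steps.foldl (fun (acc : Int × Int) step =>
    let agent := (PySem.Dict.ofList step).getD "agent" ""   -- step["agent"]; Pre_ guarantees the key is present
    let base := pvBaseEstimates.getD agent 1000
    (acc.1 + pvInt04 base, acc.2 + pvInt06 base)) (0, 0)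
  [("input_tokens", totals.1), ("output_tokens", totals.2), ("total_tokens", totals.1 + totals.2)]

-- ===== PORT B =====
-- _SPLITS: precomputed (int(base*0.4), int(base*0.6)) per known agent; default (400, 600)
def pvSplits : PySem.Dict String (Int × Int) :=
  PySem.Dict.ofList [("TriageAgent", (320, 480)), ("EnrichmentAgent", (480, 720)),
    ("InvestigationAgent", (800, 1200)), ("CorrelationAgent", (600, 900)),
    ("ResponseAgent", (400, 600)), ("ReportingAgent", (720, 1080)), ("KnowledgeAgent", (240, 360))]

def estimate_token_usage_py_alt (execution_steps : List (List (String × String))) : List (String × Int) :=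
  let counts := PySem.Dict.counter
    (execution_steps.map (fun step => (PySem.Dict.ofList step).getD "agent" ""))  -- Counter(step["agent"] for step in …)
  let total_input := (counts.items.map (fun ac => (pvSplits.getD ac.1 (400, 600)).1 * ac.2)).sum
  let total_output := (counts.items.map (fun ac => (pvSplits.getD ac.1 (400, 600)).2 * ac.2)).sum
  [("input_tokens", total_input), ("output_tokens", total_output), ("total_tokens", total_input + total_output)]

-- ===== PRECONDITION & SPEC =====
-- Pre_ excludes exactly the steps missing the "agent" key, on which Python A (and B) raise KeyError.
def Pre_estimate_token_usage_py (execution_steps : List (List (String × String))) : Prop :=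
  (execution_steps.all (fun step => (PySem.Dict.ofList step).contains "agent")) = true
instance (execution_steps : List (List (String × String))) : Decidable (Pre_estimate_token_usage_py execution_steps) := by unfold Pre_estimate_token_usage_py; infer_instance
def pvWitness_estimate_token_usage_py : (List (List (String × String))) :=
  [[("agent", "TriageAgent")], [("agent", "NewAgent"), ("task", "scan")]]
def Spec_estimate_token_usage_py (execution_steps : List (List (String × String))) (out : List (String × Int)) : Prop := out = estimate_token_usage_py_alt execution_steps
instance (execution_steps : List (List (String × String))) (out : List (String × Int)) : Decidable (Spec_estimate_token_usage_py execution_steps out) := by unfold Spec_estimate_token_usage_py; infer_instance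

-- ===== CLAIM (what is proved, stated in full; the proofs are below) =====
def Claim_equal_estimate_token_usage_py : Prop := ∀ (execution_steps : List (List (String × String))), Dom_estimate_token_usage_py execution_steps → Pre_estimate_token_usage_py execution_steps → Spec_estimate_token_usage_py execution_steps (estimate_token_usage_py execution_steps)

-- ===== LEMMAS AND PROOFS =====

-- the split table agrees with "look up the base, then take int(·*0.4) / int(·*0.6)"
theorem pv_splits_eq (a : String) :
    pvSplits.getD a (400, 600)
      = (pvInt04 (pvBaseEstimates.getD a 1000), pvInt06 (pvBaseEstimates.getD a 1000)) := by
  by_cases h1 : a = "TriageAgent"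
  · subst h1; decide
  by_cases h2 : a = "EnrichmentAgent"
  · subst h2; decide
  by_cases h3 : a = "InvestigationAgent"
  · subst h3; decide
  by_cases h4 : a = "CorrelationAgent"
  · subst h4; decide
  by_cases h5 : a = "ResponseAgent"
  · subst h5; decide
  by_cases h6 : a = "ReportingAgent"
  · subst h6; decide
  by_cases h7 : a = "KnowledgeAgent"
  · subst h7; decide
  simp [pvSplits, pvBaseEstimates, PySem.Dict.ofList, PySem.Dict.update,
    PySem.Dict.getD_insert, PySem.Dict.getD_empty, h1, h2, h3, h4, h5, h6, h7, pvInt04, pvInt06]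

-- a fold that only adds is a sum
theorem pv_foldl_add_sum (l : List (List (String × String))) (f : List (String × String) → Int) (i : Int) :
    l.foldl (fun s e => s + f e) i = i + (l.map f).sum := by
  induction l generalizing i with
  | nil => simp
  | cons x xs ih => simp [ih, add_assoc]

-- summing g(a)·count(a) over the distinct agents equals summing g per occurrence
theorem pv_dedup_count_sum (l : List String) (g : String → Int) :
    ((PySem.Set.ofList l).map (fun k => g k * (l.count k : Int))).sum = (l.map g).sum := by
  have hfin : (PySem.Set.ofList l : List String).toFinset = l.toFinset := by
    ext x; simp [PySem.Set.mem_ofList]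
  rw [Finset.sum_list_map_count l g, ← List.sum_toFinset _ (PySem.Set.nodup_ofList l), hfin]
  refine Finset.sum_congr rfl (fun x _ => ?_)
  simp [mul_comm]

-- each of B's two counter sums equals the corresponding per-occurrence sum
theorem pv_counter_sum (steps : List (List (String × String))) (h : String → Int) :
    (((PySem.Dict.counter (steps.map (fun step => (PySem.Dict.ofList step).getD "agent" ""))).items).map
        (fun ac => h ac.1 * ac.2)).sum
      = (steps.map (fun step => h ((PySem.Dict.ofList step).getD "agent" ""))).sum := by
  rw [PySem.Dict.items_counter, List.map_map]
  have := pv_dedup_count_sum (steps.map (fun step => (PySem.Dict.ofList step).getD "agent" "")) h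
  simpa [Function.comp, List.map_map] using this

-- ===== VERDICT (by name: the statement is the Claim_ definition above) =====
theorem estimate_token_usage_py_spec : Claim_equal_estimate_token_usage_py := by
  intro steps _ _
  unfold Spec_estimate_token_usage_py estimate_token_usage_py estimate_token_usage_py_alt
  dsimp only
  rw [PySem.List.foldl_prod_mk
       (f := fun s step => s + pvInt04 (pvBaseEstimates.getD ((PySem.Dict.ofList step).getD "agent" "") 1000))
       (g := fun s step => s + pvInt06 (pvBaseEstimates.getD ((PySem.Dict.ofList step).getD "agent" "") 1000)),
     pv_foldl_add_sum, pv_foldl_add_sum,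
     pv_counter_sum steps (fun a => (pvSplits.getD a (400, 600)).1),
     pv_counter_sum steps (fun a => (pvSplits.getD a (400, 600)).2)]
  simp [pv_splits_eq]
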